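-- pv_equiv track=rewrite | github.com/balasahebgulave/Django-similarity-score-app | SimilarCompaniesPOC/SimilarityScore/vector.py | get_label_codes
-- ===== SOURCE A (Python) =====
-- def get_label_codes(data):
--     key_dict = {}
--     counter = 1
--     for val in data:
--         if val not in key_dict.keys():
--             key_dict[val] = counter
--             counter+=1
--     return key_dict
-- ===== SOURCE B (Python) =====
-- def get_label_codes(data):
--     first = {v: i for i, v in reversed(list(enumerate(data)))}
--     pairs = sorted(first.items(), key=lambda p: p[1])
--     return {v: r for r, (v, _) in enumerate(pairs, 1)}
-- ===== Notes on version B (the rewrite author's own statement) =====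
-- stated objective: alternative
-- what changed: Instead of A's single forward loop with a membership test and a manual counter, B computes each value's first-occurrence index by overwriting a dict while iterating the enumerated data in reverse, sorts the (value, first-index) pairs by that index, and assigns codes 1.. by rank in the sorted order.
import Mathlib
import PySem

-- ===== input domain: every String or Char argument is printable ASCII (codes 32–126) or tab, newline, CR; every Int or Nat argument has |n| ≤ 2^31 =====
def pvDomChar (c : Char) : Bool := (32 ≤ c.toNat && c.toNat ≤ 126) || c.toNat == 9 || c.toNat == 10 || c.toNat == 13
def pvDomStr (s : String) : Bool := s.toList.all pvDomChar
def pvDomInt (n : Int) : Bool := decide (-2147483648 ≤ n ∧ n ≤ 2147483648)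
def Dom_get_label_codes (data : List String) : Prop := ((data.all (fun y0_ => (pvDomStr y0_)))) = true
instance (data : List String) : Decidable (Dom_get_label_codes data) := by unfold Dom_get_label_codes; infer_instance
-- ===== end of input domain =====

-- B replaces A's single accumulation loop (dict membership test + manual counter) by a
-- different algorithm: first-occurrence indices via reversed-overwrite, sort by index, rank.


-- ===== PORT A =====
def get_label_codes (data : List String) : List (String × Int) :=
  (data.foldl
    (fun (s : PySem.Dict String Int × Int) val =>
      if !(s.1.contains val) then (s.1.insert val s.2, s.2 + 1) else s)
    (PySem.Dict.empty, 1)).1.items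

-- ===== PORT B =====
def get_label_codes_alt (data : List String) : List (String × Int) :=
  let first : PySem.Dict String Int :=
    ((PySem.List.enumerate data 0).reverse).foldl
      (fun d p => d.insert p.2 p.1) PySem.Dict.empty
  let pairs := PySem.List.sorted first.items (fun p => p.2) false
  (PySem.List.enumerate pairs 1).map (fun p => (p.2.1, p.1))

-- ===== PRECONDITION & SPEC =====
def Spec_get_label_codes (data : List String) (out : List (String × Int)) : Prop := out = get_label_codes_alt data
instance (data : List String) (out : List (String × Int)) : Decidable (Spec_get_label_codes data out) := by unfold Spec_get_label_codes; infer_instance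

-- ===== CLAIM (what is proved, stated in full; the proofs are below) =====
def Claim_equal_get_label_codes : Prop := ∀ (data : List String), Dom_get_label_codes data → Spec_get_label_codes data (get_label_codes data)

-- ===== LEMMAS AND PROOFS =====

-- codes assigned to a list of (distinct) values, in order, starting at 1
def pvCodes (l : List String) : List (String × Int) :=
  (PySem.List.enumerate l 1).map (fun p => (p.2, p.1))

-- the dict A has built after seeing the distinct values `pre` (in order)
def pvD (pre : List String) : PySem.Dict String Int :=
  PySem.Dict.mk (pvCodes pre)

theorem pvD_keys (pre : List String) : (pvD pre).keys = pre := by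
  simp only [pvD, pvCodes, PySem.Dict.keys]
  rw [List.map_map]
  exact PySem.List.map_snd_enumerate pre 1

theorem pvD_contains (pre : List String) (val : String) :
    (pvD pre).contains val = decide (val ∈ pre) := by
  rw [PySem.Dict.contains_eq_decide_mem_keys, pvD_keys]

theorem pvD_append (pre : List String) (val : String) (h : val ∉ pre) :
    pvD (pre ++ [val]) = (pvD pre).insert val ((pre.length : Int) + 1) := by
  apply PySem.Dict.ext
  rw [PySem.Dict.items_insert_of_not_contains _ _ (by simp [pvD_contains, h])]
  simp only [pvD, pvCodes, PySem.List.enumerate_append]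
  simp [PySem.List.enumerate, add_comm]

theorem pvLoop (data : List String) : ∀ (pre : List String), pre.Nodup →
    data.foldl
      (fun (s : PySem.Dict String Int × Int) val =>
        if !(s.1.contains val) then (s.1.insert val s.2, s.2 + 1) else s)
      (pvD pre, (pre.length : Int) + 1)
    = (pvD (PySem.Set.update pre data), ((PySem.Set.update pre data).length : Int) + 1) := by
  induction data with
  | nil => intro pre _; simp [PySem.Set.update]
  | cons val rest ih =>
    intro pre hnd
    simp only [List.foldl_cons]
    by_cases hv : val ∈ pre
    · have : (pvD pre).contains val = true := by simp [pvD_contains, hv]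
      rw [show PySem.Set.update pre (val :: rest) = PySem.Set.update (PySem.Set.add pre val) rest from rfl]
      rw [show PySem.Set.add pre val = pre from by simp [PySem.Set.add, PySem.Set.contains, hv]]
      simpa [this] using ih pre hnd
    · have hc : (pvD pre).contains val = false := by simp [pvD_contains, hv]
      rw [show PySem.Set.update pre (val :: rest) = PySem.Set.update (PySem.Set.add pre val) rest from rfl]
      rw [show PySem.Set.add pre val = pre ++ [val] from by simp [PySem.Set.add, PySem.Set.contains, hv]]
      have hnd' : (pre ++ [val]).Nodup := by
        simp only [List.nodup_append, List.nodup_cons, List.not_mem_nil, not_false_iff,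
          List.nodup_nil, and_true, true_and]
        exact ⟨hnd, fun a ha b hb => by simp at hb; exact fun h => hv (hb ▸ h ▸ ha)⟩
      have hstep : (if !((pvD pre).contains val) then
            ((pvD pre).insert val ((pre.length : Int) + 1), ((pre.length : Int) + 1) + 1)
          else (pvD pre, (pre.length : Int) + 1))
          = (pvD (pre ++ [val]), ((pre ++ [val]).length : Int) + 1) := by
        rw [hc, pvD_append pre val hv]
        simp only [Bool.not_false, if_true, List.length_append, List.length_cons,
          List.length_nil, Prod.mk.injEq]
        constructor
        · trivial
        · push_cast; ring
      rw [hstep]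
      exact ih (pre ++ [val]) hnd'

theorem pvD_nil : pvD [] = PySem.Dict.empty := rfl

-- A computes the codes of the ordered distinct values
theorem pvA_eq (data : List String) :
    get_label_codes data = pvCodes (PySem.Set.ofList data) := by
  unfold get_label_codes
  have := pvLoop data [] List.nodup_nil
  rw [pvD_nil] at this
  simp only [List.length_nil, Int.natCast_zero, zero_add] at this
  rw [this]
  rfl

-- a foldl of overwriting inserts: the LAST write to a key wins
theorem pvGetD_foldl (l : List (Int × String)) (d : PySem.Dict String Int)
    (k : String) (v : Int) :
    (l.foldl (fun d p => d.insert p.2 p.1) d).getD k v =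
      match l.reverse.find? (fun p => p.2 == k) with
      | some p => p.1
      | none => d.getD k v := by
  induction l generalizing d with
  | nil => simp
  | cons p l ih =>
    simp only [List.foldl_cons, List.reverse_cons, List.find?_append]
    rw [ih]
    cases h : l.reverse.find? (fun q => q.2 == k) with
    | some q => simp
    | none =>
      simp only [Option.none_or]
      by_cases hk : p.2 = k
      · simp [List.find?, hk]
      · simp [List.find?_nil, beq_eq_false_iff_ne.mpr hk,
          PySem.Dict.getD_insert, Ne.symm hk]

-- the first match in an enumeration is the first occurrence
theorem pvFind_enumerate (data : List String) (k : String) (hk : k ∈ data) :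
    ∀ s : Int, (PySem.List.enumerate data s).find? (fun p => p.2 == k) =
      some (s + (data.idxOf k : Int), k) := by
  induction data with
  | nil => cases hk
  | cons x xs ih =>
    intro s
    rw [PySem.List.enumerate_cons]
    by_cases hx : x = k
    · subst hx
      simp [List.find?, List.idxOf_cons_self]
    · have hk' : k ∈ xs := by cases hk with
        | head => exact absurd rfl hx
        | tail _ h => exact h
      rw [List.find?_cons_of_neg (by simp [hx])]
      rw [ih hk' (s + 1), List.idxOf_cons_ne _ (by exact hx)]
      congr 1
      push_cast
      ring_nf

-- first-occurrence indices are strictly increasing along the ordered distinct values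
theorem pvIdx_pairwise : ∀ data : List String,
    (PySem.Set.ofList data).Pairwise (fun u w => data.idxOf u < data.idxOf w) := by
  intro data
  induction data with
  | nil => simp [PySem.Set.ofList_nil]
  | cons x xs ih =>
    rw [PySem.Set.ofList_cons]
    constructor
    · intro w hw
      have hw2 := ((PySem.Set.mem_discard _ _ _).mp hw).2
      rw [List.idxOf_cons_self, List.idxOf_cons_ne _ (Ne.symm hw2)]
      exact Nat.succ_pos _
    · have hsub : (PySem.Set.discard (PySem.Set.ofList xs) x).Sublist (PySem.Set.ofList xs) := by
        simp only [PySem.Set.discard]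
        exact List.filter_sublist
      have := (ih.sublist hsub)
      refine this.imp_of_mem ?_
      intro u w hu hw h
      have hux : u ≠ x := ((PySem.Set.mem_discard _ _ _).mp hu).2
      have hwx : w ≠ x := ((PySem.Set.mem_discard _ _ _).mp hw).2
      rw [List.idxOf_cons_ne _ (Ne.symm hux), List.idxOf_cons_ne _ (Ne.symm hwx)]
      omega

-- ranking an enumerated list of (value, index) pairs keeps only the values
theorem pvRank_map {β : Type} (g : String → β) (l : List String) :
    ∀ s : Int, (PySem.List.enumerate (l.map (fun v => (v, g v))) s).map (fun p => (p.2.1, p.1))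
      = (PySem.List.enumerate l s).map (fun p => (p.2, p.1)) := by
  induction l with
  | nil => intro s; simp [PySem.List.enumerate_nil]
  | cons x xs ih => intro s; simp [PySem.List.enumerate_cons, ih]

theorem pvB_eq (data : List String) :
    get_label_codes_alt data = pvCodes (PySem.Set.ofList data) := by
  unfold get_label_codes_alt
  have hkeys : (((PySem.List.enumerate data 0).reverse).foldl
      (fun d p => d.insert p.2 p.1) (PySem.Dict.empty : PySem.Dict String Int)).keys
      = PySem.Set.ofList data.reverse := by
    have h1 := PySem.Dict.keys_foldl_insert_key
      (l := (PySem.List.enumerate data 0).reverse) (key := fun p => p.2)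
      (f := fun _ p => p.1) (d := (PySem.Dict.empty : PySem.Dict String Int))
    rw [List.map_reverse, PySem.List.map_snd_enumerate] at h1
    simp only [PySem.Dict.keys_empty] at h1
    rw [PySem.Set.update_nil_left] at h1
    exact h1
  have hnd : (((PySem.List.enumerate data 0).reverse).foldl
      (fun d p => d.insert p.2 p.1) (PySem.Dict.empty : PySem.Dict String Int)).keys.Nodup := by
    rw [hkeys]; exact PySem.Set.nodup_ofList _
  have hitems : (((PySem.List.enumerate data 0).reverse).foldl
      (fun d p => d.insert p.2 p.1) (PySem.Dict.empty : PySem.Dict String Int)).items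
      = (PySem.Set.ofList data.reverse).map (fun k => (k, (data.idxOf k : Int))) := by
    rw [PySem.Dict.items_eq_map_keys _ hnd 0, hkeys]
    apply List.map_congr_left
    intro k hk
    have hkd : k ∈ data := by
      rw [← List.mem_reverse]
      exact (PySem.Set.mem_ofList _ _).mp hk
    rw [pvGetD_foldl, List.reverse_reverse, pvFind_enumerate data k hkd 0]
    simp
  have hperm : ((PySem.Set.ofList data).map (fun k => (k, (data.idxOf k : Int)))).Perm
      ((((PySem.List.enumerate data 0).reverse).foldl
        (fun d p => d.insert p.2 p.1) (PySem.Dict.empty : PySem.Dict String Int)).items) := by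
    rw [hitems]
    apply List.Perm.map
    apply (List.perm_ext_iff_of_nodup (PySem.Set.nodup_ofList _) (PySem.Set.nodup_ofList _)).mpr
    intro a
    simp [PySem.Set.mem_ofList]
  have hpw : ((PySem.Set.ofList data).map (fun k => (k, (data.idxOf k : Int)))).Pairwise
      (fun a b => (fun p : String × Int => p.2) a < (fun p : String × Int => p.2) b) := by
    rw [List.pairwise_map]
    refine (pvIdx_pairwise data).imp ?_
    intro u w h
    show ((data.idxOf u : Int) < (data.idxOf w : Int))
    exact_mod_cast h
  simp only []
  have hs := PySem.List.sorted_eq_of_perm_of_pairwise_lt _ _ (fun p : String × Int => p.2) hperm hpw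
  rw [hs]
  rw [pvRank_map]
  rfl

-- ===== VERDICT (by name: the statement is the Claim_ definition above) =====
theorem get_label_codes_spec : Claim_equal_get_label_codes := by
  intro data _
  unfold Spec_get_label_codes
  rw [pvA_eq, pvB_eq]
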